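-- pv_equiv track=rewrite | github.com/Mkord99/My_Thesis | Versions/thesis_v19/src/visibility_analyzer.py | _update_segment_visibility
-- ===== SOURCE A (Python) =====
-- def _update_segment_visibility(segments, edge_particle_visibility):
--     """
--     Update segment visibility based on particle visibility.
--
--     Args:
--         segments: List of segments
--         edge_particle_visibility: Dictionary of particle visibility
--
--     Returns:
--         Updated segment visibility dictionary
--     """
--     segment_visibility_particles = {}
--
--     # Initialize segment visibility
--     for seg_idx in range(len(segments)):
--         segment_visibility_particles[seg_idx] = []
--
--         # Check each edge
--         for edge, particles in edge_particle_visibility.items():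
--             # Check if any particle on this edge can see the segment
--             for part_idx, particle_vis in particles.items():
--                 if seg_idx in particle_vis:
--                     segment_visibility_particles[seg_idx].append(edge)
--                     break  # One particle is enough
--
--     return segment_visibility_particles
-- ===== SOURCE B (Python) =====
-- def _update_segment_visibility(segments, edge_particle_visibility):
--     """Inverted-loop re-implementation: one pass over edges/particles,
--     pushing each edge onto the buckets of the segments it can see (deduped
--     per edge), instead of re-scanning all edges for every segment."""
--     n = len(segments)
--     buckets = {seg_idx: [] for seg_idx in range(n)}
--     for edge, particles in edge_particle_visibility.items():
--         seen = set()
--         for particle_vis in particles.values():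
--             for s in particle_vis:
--                 if 0 <= s < n and s not in seen:
--                     seen.add(s)
--                     buckets[s].append(edge)
--     return buckets
-- ===== Notes on version B (the rewrite author's own statement) =====
-- stated objective: faster
-- what changed: Inverts the loop nesting: instead of scanning every edge and every particle for each segment, B makes one pass over edges/particles and pushes each edge onto the buckets of the segment indices its particles can see, deduplicating per edge with a seen-set.
import Mathlib
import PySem

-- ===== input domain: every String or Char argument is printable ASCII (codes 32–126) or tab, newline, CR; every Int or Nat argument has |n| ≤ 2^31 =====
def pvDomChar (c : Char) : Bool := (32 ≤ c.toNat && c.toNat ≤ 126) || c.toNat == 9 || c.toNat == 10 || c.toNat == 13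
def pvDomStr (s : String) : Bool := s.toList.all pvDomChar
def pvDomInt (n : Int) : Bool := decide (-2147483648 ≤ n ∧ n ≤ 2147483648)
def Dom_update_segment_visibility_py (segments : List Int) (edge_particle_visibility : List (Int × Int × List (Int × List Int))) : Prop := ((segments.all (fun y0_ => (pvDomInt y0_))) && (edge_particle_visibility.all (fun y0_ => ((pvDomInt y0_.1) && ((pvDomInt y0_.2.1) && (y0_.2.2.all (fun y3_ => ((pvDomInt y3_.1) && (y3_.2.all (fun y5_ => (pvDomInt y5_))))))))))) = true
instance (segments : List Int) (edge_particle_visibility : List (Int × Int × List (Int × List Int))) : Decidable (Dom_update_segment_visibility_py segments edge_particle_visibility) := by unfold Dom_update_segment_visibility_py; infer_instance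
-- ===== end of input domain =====

-- B inverts the loop nesting (one pass over edges/particles, pushing edges onto segment buckets,
-- deduped per edge) instead of A's per-segment scan of all edges; same return value, proved below.


-- ===== PORT A =====
-- for each seg_idx in range(len(segments)): scan all edges; the inner particle loop with
-- `break` (append the edge once if any particle's visibility list contains seg_idx) is `.any`
def update_segment_visibility_py (segments : List Int) (edge_particle_visibility : List (Int × Int × List (Int × List Int))) : List (Int × List (Int × Int)) :=
  (List.range segments.length).foldl
    (fun acc (seg_idx : Nat) =>
      acc ++ [((seg_idx : Int),
        edge_particle_visibility.foldl
          (fun es e =>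
            if e.2.2.any (fun p => p.2.contains (seg_idx : Int)) then es ++ [(e.1, e.2.1)] else es)
          [])])
    []

-- ===== PORT B =====
-- append `edge` to the bucket keyed `s` (buckets is the assoc list of segment buckets)
def pvAddTo (buckets : List (Int × List (Int × Int))) (s : Int) (edge : Int × Int) : List (Int × List (Int × Int)) :=
  buckets.map (fun b => if b.1 = s then (b.1, b.2 ++ [edge]) else b)

-- one pass over edges; per edge, walk all particles' visibility lists with a seen-set
def update_segment_visibility_py_alt (segments : List Int) (edge_particle_visibility : List (Int × Int × List (Int × List Int))) : List (Int × List (Int × Int)) :=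
  let init : List (Int × List (Int × Int)) :=
    (List.range segments.length).map (fun i : Nat => ((i : Int), ([] : List (Int × Int))))
  edge_particle_visibility.foldl
    (fun buckets e =>
      (e.2.2.foldl
        (fun (st : List (Int × List (Int × Int)) × List Int) p =>
          p.2.foldl
            (fun st s =>
              if 0 ≤ s ∧ s < (segments.length : Int) ∧ ¬ st.2.contains s
              then (pvAddTo st.1 s (e.1, e.2.1), s :: st.2) else st)
            st)
        (buckets, ([] : List Int))).1)
    init

-- ===== PRECONDITION & SPEC =====
def Spec_update_segment_visibility_py (segments : List Int) (edge_particle_visibility : List (Int × Int × List (Int × List Int))) (out : List (Int × List (Int × Int))) : Prop := out = update_segment_visibility_py_alt segments edge_particle_visibility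
instance (segments : List Int) (edge_particle_visibility : List (Int × Int × List (Int × List Int))) (out : List (Int × List (Int × Int))) : Decidable (Spec_update_segment_visibility_py segments edge_particle_visibility out) := by unfold Spec_update_segment_visibility_py; infer_instance

-- ===== CLAIM (what is proved, stated in full; the proofs are below) =====
def Claim_equal_update_segment_visibility_py : Prop := ∀ (segments : List Int) (edge_particle_visibility : List (Int × Int × List (Int × List Int))), Dom_update_segment_visibility_py segments edge_particle_visibility → Spec_update_segment_visibility_py segments edge_particle_visibility (update_segment_visibility_py segments edge_particle_visibility)

-- ===== LEMMAS AND PROOFS =====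

-- edges (in input order) whose particles can see segment index i
def pvEdgesFor (epv : List (Int × Int × List (Int × List Int))) (i : Int) : List (Int × Int) :=
  epv.filterMap (fun e => if e.2.2.any (fun p => p.2.contains i) then some (e.1, e.2.1) else none)

theorem pv_foldl_snoc {α β : Type} (g : α → β) :
    ∀ (l : List α) (init : List β),
      l.foldl (fun acc x => acc ++ [g x]) init = init ++ l.map g := by
  intro l
  induction l with
  | nil => simp
  | cons x xs ih => intro init; simp [List.foldl, ih]

theorem pv_foldl_filter {α β : Type} (c : α → Bool) (g : α → β) :
    ∀ (l : List α) (init : List β),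
      l.foldl (fun acc x => if c x then acc ++ [g x] else acc) init
        = init ++ l.filterMap (fun x => if c x then some (g x) else none) := by
  intro l
  induction l with
  | nil => simp
  | cons x xs ih =>
    intro init
    by_cases h : c x = true <;> simp [List.foldl, h, ih]

theorem pvA_eq (segments : List Int) (epv : List (Int × Int × List (Int × List Int))) :
    update_segment_visibility_py segments epv
      = (List.range segments.length).map (fun i : Nat => ((i : Int), pvEdgesFor epv (i : Int))) := by
  unfold update_segment_visibility_py
  have h : ∀ seg_idx : Nat,
      epv.foldl
        (fun es e =>
          if e.2.2.any (fun p => p.2.contains (seg_idx : Int)) then es ++ [(e.1, e.2.1)] else es)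
        [] = pvEdgesFor epv (seg_idx : Int) := by
    intro seg_idx
    have := pv_foldl_filter
      (fun e : Int × Int × List (Int × List Int) => e.2.2.any (fun p => p.2.contains (seg_idx : Int)))
      (fun e => (e.1, e.2.1)) epv []
    simpa [pvEdgesFor] using this
  simp only [h]
  exact (pv_foldl_snoc (fun seg_idx : Nat => ((seg_idx : Int), pvEdgesFor epv (seg_idx : Int)))
    (List.range segments.length) []).trans (by rw [List.nil_append])

-- inner two-level fold over particles = fold over the flattened visibility lists
theorem pv_foldl_flatten_snd {σ : Type} (f : σ → Int → σ) :
    ∀ (ps : List (Int × List Int)) (st : σ),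
      ps.foldl (fun st p => p.2.foldl f st) st = ((ps.map Prod.snd).flatten).foldl f st := by
  intro ps
  induction ps with
  | nil => intro st; simp
  | cons p ps ih => intro st; simp [List.foldl, ih, List.foldl_append]

-- pvAddTo on range-shaped buckets
theorem pv_addTo_range (n : Nat) (g : Nat → List (Int × Int)) (v : Int) (edge : Int × Int) :
    pvAddTo ((List.range n).map (fun i : Nat => ((i : Int), g i))) v edge
      = (List.range n).map (fun i : Nat => ((i : Int), if (i : Int) = v then g i ++ [edge] else g i)) := by
  unfold pvAddTo
  rw [List.map_map]
  apply List.map_congr_left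
  intro i _
  by_cases h : (i : Int) = v <;> simp [h]

-- the inner seen-set fold: `edge` gets appended exactly at the fresh in-range seg ids of vs,
-- and the seen list collects exactly the in-range ids of vs (plus the old seen)
theorem pv_inner (n : Nat) (edge : Int × Int) :
    ∀ (vs : List Int) (g : Nat → List (Int × Int)) (seen : List Int),
      (vs.foldl
        (fun (st : List (Int × List (Int × Int)) × List Int) s =>
          if 0 ≤ s ∧ s < (n : Int) ∧ ¬ st.2.contains s then (pvAddTo st.1 s edge, s :: st.2) else st)
        ((List.range n).map (fun i : Nat => ((i : Int), g i)), seen)).1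
        = (List.range n).map
            (fun i : Nat => ((i : Int), if (i : Int) ∈ vs ∧ (i : Int) ∉ seen then g i ++ [edge] else g i))
      ∧ ∀ s : Int,
          s ∈ (vs.foldl
            (fun (st : List (Int × List (Int × Int)) × List Int) s =>
              if 0 ≤ s ∧ s < (n : Int) ∧ ¬ st.2.contains s then (pvAddTo st.1 s edge, s :: st.2) else st)
            ((List.range n).map (fun i : Nat => ((i : Int), g i)), seen)).2
          ↔ s ∈ seen ∨ (s ∈ vs ∧ 0 ≤ s ∧ s < (n : Int)) := by
  intro vs
  induction vs with
  | nil =>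
    intro g seen
    constructor
    · simp
    · intro s; simp
  | cons v vs ih =>
    intro g seen
    simp only [List.foldl_cons]
    by_cases h : 0 ≤ v ∧ v < (n : Int) ∧ ¬ (seen.contains v = true)
    · rw [if_pos h, pv_addTo_range]
      obtain ⟨h0, hn, hs⟩ := h
      rw [List.contains_iff_mem] at hs
      obtain ⟨ih1, ih2⟩ := ih (fun i => if (i : Int) = v then g i ++ [edge] else g i) (v :: seen)
      constructor
      · rw [ih1]
        apply List.map_congr_left
        intro i hi
        rw [List.mem_range] at hi
        by_cases hv : (i : Int) = v
        · subst hv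
          simp [hs]
        · simp only [List.mem_cons]
          by_cases h1 : (i : Int) ∈ vs <;> by_cases h2 : (i : Int) ∈ seen <;>
            simp [hv, h1, h2]
      · intro s
        rw [ih2]
        simp only [List.mem_cons]
        constructor
        · rintro (⟨hsv | hsm⟩ | ⟨hin, hr⟩)
          · exact Or.inr ⟨Or.inl hsv, by subst hsv; exact ⟨h0, hn⟩⟩
          · exact Or.inl hsm
          · exact Or.inr ⟨Or.inr hin, hr⟩
        · rintro (hsm | ⟨hv | hin, hr⟩)
          · exact Or.inl (Or.inr hsm)
          · exact Or.inl (Or.inl hv)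
          · exact Or.inr ⟨hin, hr⟩
    · rw [if_neg h]
      obtain ⟨ih1, ih2⟩ := ih g seen
      rw [List.contains_iff_mem] at h
      push Not at h
      constructor
      · rw [ih1]
        apply List.map_congr_left
        intro i hi
        rw [List.mem_range] at hi
        by_cases hv : (i : Int) = v
        · have hvseen : v ∈ seen := by
            by_contra hvs
            exact absurd (h (by omega) (by subst hv; exact_mod_cast hi)) (by simp [hvs])
          subst hv
          simp [hvseen]
        · simp only [List.mem_cons]
          by_cases h1 : (i : Int) ∈ vs <;> by_cases h2 : (i : Int) ∈ seen <;>
            simp [hv, h1, h2]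
      · intro s
        rw [ih2]
        simp only [List.mem_cons]
        constructor
        · rintro (hsm | ⟨hin, hr⟩)
          · exact Or.inl hsm
          · exact Or.inr ⟨Or.inr hin, hr⟩
        · rintro (hsm | ⟨hv | hin, hr⟩)
          · exact Or.inl hsm
          · subst hv
            have : s ∈ seen := by
              by_contra hvs
              exact absurd (h hr.1 hr.2) (by simp [hvs])
            exact Or.inl this
          · exact Or.inr ⟨hin, hr⟩

-- one edge step on range-shaped buckets
theorem pv_step (n : Nat) (e : Int × Int × List (Int × List Int)) (g : Nat → List (Int × Int)) :
    (e.2.2.foldl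
      (fun (st : List (Int × List (Int × Int)) × List Int) p =>
        p.2.foldl
          (fun st s =>
            if 0 ≤ s ∧ s < (n : Int) ∧ ¬ st.2.contains s
            then (pvAddTo st.1 s (e.1, e.2.1), s :: st.2) else st)
          st)
      ((List.range n).map (fun i : Nat => ((i : Int), g i)), ([] : List Int))).1
      = (List.range n).map
          (fun i : Nat => ((i : Int),
            if e.2.2.any (fun p => p.2.contains (i : Int)) then g i ++ [(e.1, e.2.1)] else g i)) := by
  rw [pv_foldl_flatten_snd]
  rw [(pv_inner n (e.1, e.2.1) ((e.2.2.map Prod.snd).flatten) g []).1]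
  apply List.map_congr_left
  intro i _
  have hmem : ((i : Int) ∈ (e.2.2.map Prod.snd).flatten ∧ (i : Int) ∉ ([] : List Int))
      ↔ e.2.2.any (fun p => p.2.contains (i : Int)) = true := by
    simp only [List.mem_flatten, List.mem_map, List.any_eq_true, List.contains_iff_mem,
      List.not_mem_nil, not_false_iff, and_true]
    constructor
    · rintro ⟨l, ⟨p, hp, hpl⟩, hl⟩; exact ⟨p, hp, by rw [hpl]; exact hl⟩
    · rintro ⟨p, hp, hl⟩; exact ⟨p.2, ⟨p, hp, rfl⟩, hl⟩
  by_cases hc : e.2.2.any (fun p => p.2.contains (i : Int)) = true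
  · rw [if_pos (hmem.mpr hc), if_pos hc]
  · rw [if_neg (fun hx => hc (hmem.mp hx)), if_neg hc]

theorem pvB_fold (n : Nat) :
    ∀ (epv : List (Int × Int × List (Int × List Int))) (g : Nat → List (Int × Int)),
      epv.foldl
        (fun buckets e =>
          (e.2.2.foldl
            (fun (st : List (Int × List (Int × Int)) × List Int) p =>
              p.2.foldl
                (fun st s =>
                  if 0 ≤ s ∧ s < (n : Int) ∧ ¬ st.2.contains s
                  then (pvAddTo st.1 s (e.1, e.2.1), s :: st.2) else st)
                st)
            (buckets, ([] : List Int))).1)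
        ((List.range n).map (fun i : Nat => ((i : Int), g i)))
      = (List.range n).map (fun i : Nat => ((i : Int), g i ++ pvEdgesFor epv (i : Int))) := by
  intro epv
  induction epv with
  | nil => intro g; simp [pvEdgesFor]
  | cons e epv ih =>
    intro g
    rw [List.foldl_cons, pv_step n e g, ih]
    apply List.map_congr_left
    intro i _
    simp only [pvEdgesFor, List.filterMap_cons]
    by_cases hc : e.2.2.any (fun p => p.2.contains (i : Int)) = true
    · rw [if_pos hc, if_pos hc]
      simp
    · rw [if_neg hc, if_neg hc]

theorem pvB_eq (segments : List Int) (epv : List (Int × Int × List (Int × List Int))) :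
    update_segment_visibility_py_alt segments epv
      = (List.range segments.length).map (fun i : Nat => ((i : Int), pvEdgesFor epv (i : Int))) := by
  unfold update_segment_visibility_py_alt
  have := pvB_fold segments.length epv (fun _ => ([] : List (Int × Int)))
  simp only [List.nil_append] at this
  exact this

-- ===== VERDICT (by name: the statement is the Claim_ definition above) =====
theorem update_segment_visibility_py_spec : Claim_equal_update_segment_visibility_py := by
  intro segments epv _
  unfold Spec_update_segment_visibility_py
  rw [pvA_eq, pvB_eq]
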